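-- pv_equiv track=rewrite | github.com/illstandtall/Algorithms | Programmers/weekly_4_직업군추천하기.py | solution
-- ===== SOURCE A (Python) =====
-- def solution(table, languages, preference):
--     answer = ('Z', -1)
--     lang_pref = {l: p for l, p in zip(languages, preference)}
--
--     for tab in table:
--         table_dict = dict()
--         score = 0
--
--         t = tab.split()
--         table_dict = {t[1]: 5, t[2]: 4, t[3]: 3, t[4]: 2, t[5]: 1}
--
--         for lang in lang_pref:
--             if lang in table_dict:
--                 score += (lang_pref[lang] * table_dict[lang])
--
--         if answer[1] < score or (answer[1] == score and answer[0] > t[0]):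
--             answer = (t[0], score)
--
--     return answer[0]
-- ===== SOURCE B (Python) =====
-- def solution(table, languages, preference):
--     # Score each row by its own five weighted tokens, then pick the best candidate with min() under
--     # the Python tie-break key (-score, name); ('Z', -1) is the seeded default candidate.
--     pref = dict(zip(languages, preference))
--     candidates = [('Z', -1)]
--     for row in table:
--         t = row.split()
--         weights = {t[i]: 6 - i for i in range(1, 6)}
--         s = sum(w * pref[tok] for tok, w in weights.items() if tok in pref)
--         candidates.append((t[0], s))
--     return min(candidates, key=lambda c: (-c[1], c[0]))[0]
-- ===== Notes on version B (the rewrite author's own statement) =====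
-- stated objective: alternative
-- what changed: B scores each row by iterating its own five weighted tokens with lookups into a preference dict built once (instead of scanning the whole language list for every row), and picks the winner with min() over a candidate list under the key (-score, name) instead of a running tie-break accumulator.
import Mathlib
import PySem

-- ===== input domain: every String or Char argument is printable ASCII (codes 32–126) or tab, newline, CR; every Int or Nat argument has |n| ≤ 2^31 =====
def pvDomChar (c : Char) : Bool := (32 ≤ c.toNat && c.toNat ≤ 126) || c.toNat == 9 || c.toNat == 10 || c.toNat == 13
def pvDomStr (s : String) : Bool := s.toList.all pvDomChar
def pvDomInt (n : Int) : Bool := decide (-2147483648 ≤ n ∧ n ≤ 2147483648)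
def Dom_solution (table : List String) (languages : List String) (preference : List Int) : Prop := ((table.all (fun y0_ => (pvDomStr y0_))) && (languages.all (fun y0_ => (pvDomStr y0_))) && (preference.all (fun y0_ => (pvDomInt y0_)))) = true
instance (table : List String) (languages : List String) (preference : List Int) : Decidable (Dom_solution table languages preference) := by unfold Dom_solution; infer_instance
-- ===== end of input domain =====

-- B scores each row by iterating its own five weighted tokens against a preference dict built
-- once, and selects the winner with min() under the key (-score, name) instead of A's per-row
-- scan of all languages and running tie-break accumulator.

-- ===== PORT A =====
-- score of one split row: 'for lang in lang_pref: if lang in table_dict: score += lang_pref[lang]*table_dict[lang]'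
-- (lang_pref[lang] cannot raise here since lang is one of lang_pref's keys: getD is exact)
def rowScoreA (lang_pref : PySem.Dict String Int) (t : List String) : Int :=
  let table_dict : PySem.Dict String Int :=
    PySem.Dict.ofList [(PySem.List.pyGetD t 1 "", 5), (PySem.List.pyGetD t 2 "", 4), (PySem.List.pyGetD t 3 "", 3),
                       (PySem.List.pyGetD t 4 "", 2), (PySem.List.pyGetD t 5 "", 1)]
  lang_pref.keys.foldl
    (fun score lang =>
      if table_dict.contains lang then score + lang_pref.getD lang 0 * table_dict.getD lang 0
      else score) 0

-- t[1..5] are read with pyGetD "": reachable only off Pre_solution (Python raises IndexError there)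
def solution (table : List String) (languages : List String) (preference : List Int) : String :=
  let lang_pref : PySem.Dict String Int := PySem.Dict.ofList (languages.zip preference)
  (table.foldl
    (fun answer tab =>
      let t := PySem.Str.split₀ tab
      let score := rowScoreA lang_pref t
      if answer.2 < score ∨ (answer.2 = score ∧ PySem.List.pyGetD t 0 "" < answer.1)
      then (PySem.List.pyGetD t 0 "", score) else answer)
    ("Z", -1)).1

-- ===== PORT B =====
-- score of one split row: weights = {t[i]: 6-i for i in range(1,6)};
-- sum(w * pref[tok] for tok, w in weights.items() if tok in pref)
def rowScoreB (pref : PySem.Dict String Int) (t : List String) : Int :=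
  let weights : PySem.Dict String Int :=
    (PySem.List.pyRange 1 6 1).foldl (fun d i => d.insert (PySem.List.pyGetD t i "") (6 - i)) PySem.Dict.empty
  weights.items.foldl
    (fun s tw => if pref.contains tw.1 then s + tw.2 * pref.getD tw.1 0 else s) 0

def solution_alt (table : List String) (languages : List String) (preference : List Int) : String :=
  let pref : PySem.Dict String Int := PySem.Dict.ofList (languages.zip preference)
  let candidates : List (String × Int) :=
    ("Z", -1) :: table.map (fun row =>
      let t := PySem.Str.split₀ row
      (PySem.List.pyGetD t 0 "", rowScoreB pref t))
  -- min() returns the first minimal candidate; candidates is nonempty, so the "Z" default is unreachable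
  ((PySem.List.min2? candidates (fun c => -c.2) (fun c => c.1)).map Prod.fst).getD "Z"

-- ===== PRECONDITION & SPEC =====
-- Pre_ excludes exactly the inputs where the Python A raises IndexError (a row with fewer than 6
-- whitespace-separated tokens); B raises KeyError/IndexError there too.
def Pre_solution (table : List String) (languages : List String) (preference : List Int) : Prop :=
  ∀ row ∈ table, 6 ≤ (PySem.Str.split₀ row).length
instance (table : List String) (languages : List String) (preference : List Int) : Decidable (Pre_solution table languages preference) := by unfold Pre_solution; infer_instance

def pvWitness_solution : List String × List String × List Int :=
  (["backend java python c cpp sql", "front js java ts html css"], ["java", "js"], [7, 5])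

def Spec_solution (table : List String) (languages : List String) (preference : List Int) (out : String) : Prop := out = solution_alt table languages preference
instance (table : List String) (languages : List String) (preference : List Int) (out : String) : Decidable (Spec_solution table languages preference out) := by unfold Spec_solution; infer_instance

-- ===== CLAIM (what is proved, stated in full; the proofs are below) =====
def Claim_equal_solution : Prop := ∀ (table : List String) (languages : List String) (preference : List Int), Dom_solution table languages preference → Pre_solution table languages preference → Spec_solution table languages preference (solution table languages preference)

-- ===== LEMMAS AND PROOFS =====

-- conditional accumulation as a sum over the filtered list
theorem foldl_if_add_sum (l : List String) (p : String → Bool) (f : String → Int) (init : Int) :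
    l.foldl (fun s k => if p k then s + f k else s) init
      = init + ((l.filter p).map f).sum := by
  induction l generalizing init with
  | nil => simp
  | cons x xs ih =>
    by_cases h : p x <;> simp [h, ih] <;> ring

theorem swap_sum (d e : PySem.Dict String Int) (hd : d.keys.Nodup) (he : e.keys.Nodup) :
    d.keys.foldl (fun s k => if e.contains k then s + d.getD k 0 * e.getD k 0 else s) 0
      = e.keys.foldl (fun s k => if d.contains k then s + e.getD k 0 * d.getD k 0 else s) 0 := by
  rw [foldl_if_add_sum, foldl_if_add_sum, zero_add, zero_add]
  have hperm : (d.keys.filter (fun k => e.contains k)).Perm (e.keys.filter (fun k => d.contains k)) := by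
    rw [List.perm_ext_iff_of_nodup (hd.filter _) (he.filter _)]
    intro k
    simp only [List.mem_filter, PySem.Dict.contains_iff_mem_keys]
    tauto
  calc ((d.keys.filter (fun k => e.contains k)).map (fun k => d.getD k 0 * e.getD k 0)).sum
      = ((e.keys.filter (fun k => d.contains k)).map (fun k => d.getD k 0 * e.getD k 0)).sum :=
        (hperm.map _).sum_eq
    _ = ((e.keys.filter (fun k => d.contains k)).map (fun k => e.getD k 0 * d.getD k 0)).sum := by
        simp [mul_comm]

theorem score_eq (pref : PySem.Dict String Int) (hp : pref.keys.Nodup) (t : List String) :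
    rowScoreA pref t = rowScoreB pref t := by
  unfold rowScoreA rowScoreB
  have hw : (PySem.List.pyRange 1 6 1).foldl
      (fun d i => d.insert (PySem.List.pyGetD t i "") (6 - i)) PySem.Dict.empty
      = PySem.Dict.ofList [(PySem.List.pyGetD t 1 "", 5), (PySem.List.pyGetD t 2 "", 4),
          (PySem.List.pyGetD t 3 "", 3), (PySem.List.pyGetD t 4 "", 2), (PySem.List.pyGetD t 5 "", 1)] := by
    norm_num [PySem.Dict.ofList, PySem.Dict.update, show PySem.List.pyRange 1 6 1 = [1,2,3,4,5] from rfl,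
      List.foldl]
  have hwn : (PySem.Dict.ofList [(PySem.List.pyGetD t 1 "", 5), (PySem.List.pyGetD t 2 "", 4),
          (PySem.List.pyGetD t 3 "", 3), (PySem.List.pyGetD t 4 "", 2),
          (PySem.List.pyGetD t 5 "", 1)] : PySem.Dict String Int).keys.Nodup :=
    PySem.Dict.nodup_keys_ofList _
  simp only [hw, PySem.Dict.items_eq_map_keys _ hwn 0, List.foldl_map]
  exact swap_sum pref _ hp hwn

theorem min2_cons_eq (l : List (String × Int)) (m : String × Int) :
    PySem.List.min2? (m :: l) (fun c : String × Int => -c.2) (fun c : String × Int => c.1)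
      = some (l.foldl (fun ans c =>
          if ans.2 < c.2 ∨ (ans.2 = c.2 ∧ c.1 < ans.1) then c else ans) m) := by
  induction l generalizing m with
  | nil => rfl
  | cons c tl ih =>
    by_cases hcnd : m.2 < c.2 ∨ (m.2 = c.2 ∧ c.1 < m.1)
    · have hp : m.2 < c.2 ∨ (m.2 ≤ c.2 ∧ c.1.toList < m.1.toList) := by
        rcases hcnd with h | ⟨h1, h2⟩
        · exact Or.inl h
        · exact Or.inr ⟨le_of_eq h1, by simpa using h2⟩
      have h1 : PySem.List.min2? (m :: c :: tl) (fun c : String × Int => -c.2) (fun c : String × Int => c.1)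
          = PySem.List.min2? (c :: tl) (fun c : String × Int => -c.2) (fun c : String × Int => c.1) := by
        simp [PySem.List.min2?]
        rw [if_pos hp]
      rw [h1, ih c, List.foldl_cons, if_pos hcnd]
    · have hp : ¬ (m.2 < c.2 ∨ (m.2 ≤ c.2 ∧ c.1.toList < m.1.toList)) := by
        push_neg at hcnd
        obtain ⟨h1, h2⟩ := hcnd
        rintro (h | ⟨h3, h4⟩)
        · exact absurd h (not_lt.2 h1)
        · have he : m.2 = c.2 := le_antisymm h3 h1
          have h5 : c.1 < m.1 := by simpa using h4
          exact absurd h5 (not_lt.2 (h2 he))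
      have h1 : PySem.List.min2? (m :: c :: tl) (fun c : String × Int => -c.2) (fun c : String × Int => c.1)
          = PySem.List.min2? (m :: tl) (fun c : String × Int => -c.2) (fun c : String × Int => c.1) := by
        simp [PySem.List.min2?]
        rw [if_neg hp]
      rw [h1, ih m, List.foldl_cons, if_neg hcnd]

-- ===== VERDICT (by name: the statement is the Claim_ definition above) =====
theorem solution_spec : Claim_equal_solution := by
  intro table languages preference _ _
  show solution table languages preference = solution_alt table languages preference
  simp only [solution, solution_alt]
  rw [min2_cons_eq]
  rw [Option.map_some, Option.getD_some]
  rw [List.foldl_map]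
  refine congrArg Prod.fst (congrArg (fun f => List.foldl f ("Z", (-1 : Int)) table) ?_)
  funext ans tab
  rw [score_eq _ (PySem.Dict.nodup_keys_ofList (languages.zip preference))]
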